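-- pv_equiv track=rewrite | github.com/vsumedh/bertram2 | src/white_agent/hardcoded_trajectories.py | find_action_in_valid
-- ===== SOURCE A (Python) =====
-- from typing import Dict, List, Any, Tuple, Optional, Set
--
-- def find_action_in_valid(
--     intended_action: str, valid_actions: List[str]
-- ) -> Optional[str]:
--     """Find matching action in valid_actions list.
--
--     Handles case-insensitive matching and partial matching.
--
--     Returns:
--         The matching action from valid_actions, or None if not found.
--     """
--     if not valid_actions:
--         return None
--
--     intended_lower = intended_action.lower().strip()
--
--     # Exact match (case-insensitive)
--     for action in valid_actions:
--         if action.lower().strip() == intended_lower: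
--             return action
--
--     # Substring match
--     for action in valid_actions:
--         action_lower = action.lower()
--         if intended_lower in action_lower or action_lower in intended_lower:
--             return action
--
--     return None
-- ===== SOURCE B (Python) =====
-- from typing import List, Optional
--
--
-- def find_action_in_valid(
--     intended_action: str, valid_actions: List[str]
-- ) -> Optional[str]:
--     """Single pass: return on exact match, remember first substring match."""
--     intended_lower = intended_action.lower().strip()
--     substring_match = None
--     for action in valid_actions:
--         action_lower = action.lower()
--         if action_lower.strip() == intended_lower:
--             return action
--         if substring_match is None and (
--             intended_lower in action_lower or action_lower in intended_lower
--         ):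
--             substring_match = action
--     return substring_match
-- ===== Notes on version B (the rewrite author's own statement) =====
-- stated objective: alternative
-- what changed: Replaced A's two ordered passes (exact scan, then a fresh substring scan) by a single pass that returns immediately on an exact match and remembers the first substring match in a fallback variable returned after the loop.
import Mathlib
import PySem

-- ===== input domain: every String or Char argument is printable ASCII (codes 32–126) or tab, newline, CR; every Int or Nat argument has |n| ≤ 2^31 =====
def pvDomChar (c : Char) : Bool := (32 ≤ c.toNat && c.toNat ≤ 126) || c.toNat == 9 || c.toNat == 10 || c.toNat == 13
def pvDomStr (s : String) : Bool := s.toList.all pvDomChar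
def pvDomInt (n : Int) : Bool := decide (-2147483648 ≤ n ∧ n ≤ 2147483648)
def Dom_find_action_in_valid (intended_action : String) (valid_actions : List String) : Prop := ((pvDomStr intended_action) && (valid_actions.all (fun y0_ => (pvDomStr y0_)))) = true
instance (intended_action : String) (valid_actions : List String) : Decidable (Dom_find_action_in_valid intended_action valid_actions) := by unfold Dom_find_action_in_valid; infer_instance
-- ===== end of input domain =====

-- B merges A's two ordered passes into one pass that returns on the first exact
-- match and remembers the first substring match as a fallback (objective: alternative).

-- ===== PORT A =====
-- first loop of A: exact (case-insensitive, stripped) match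
def pvAExact (il : String) : List String → Option String
  | [] => none
  | a :: rest =>
    if PySem.Str.strip (PySem.Str.lower a) == il then some a else pvAExact il rest

-- second loop of A: substring match
def pvASub (il : String) : List String → Option String
  | [] => none
  | a :: rest =>
    let al := PySem.Str.lower a
    if PySem.Str.isIn il al || PySem.Str.isIn al il then some a else pvASub il rest

def find_action_in_valid (intended_action : String) (valid_actions : List String) : Option String :=
  if valid_actions = [] then none
  else
    let il := PySem.Str.strip (PySem.Str.lower intended_action)
    match pvAExact il valid_actions with
    | some a => some a
    | none => pvASub il valid_actions

-- ===== PORT B =====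
-- B's single loop carrying the substring-match fallback
def pvBGo (il : String) : List String → Option String → Option String
  | [], fb => fb
  | a :: rest, fb =>
    let al := PySem.Str.lower a
    if PySem.Str.strip al == il then some a
    else
      pvBGo il rest
        (if fb.isNone && (PySem.Str.isIn il al || PySem.Str.isIn al il) then some a else fb)

def find_action_in_valid_alt (intended_action : String) (valid_actions : List String) : Option String :=
  pvBGo (PySem.Str.strip (PySem.Str.lower intended_action)) valid_actions none

-- ===== PRECONDITION & SPEC =====
def Spec_find_action_in_valid (intended_action : String) (valid_actions : List String) (out : Option String) : Prop := out = find_action_in_valid_alt intended_action valid_actions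
instance (intended_action : String) (valid_actions : List String) (out : Option String) : Decidable (Spec_find_action_in_valid intended_action valid_actions out) := by unfold Spec_find_action_in_valid; infer_instance

-- ===== CLAIM (what is proved, stated in full; the proofs are below) =====
def Claim_equal_find_action_in_valid : Prop := ∀ (intended_action : String) (valid_actions : List String), Dom_find_action_in_valid intended_action valid_actions → Spec_find_action_in_valid intended_action valid_actions (find_action_in_valid intended_action valid_actions)

-- ===== LEMMAS AND PROOFS =====

-- B's loop = A's exact pass, with the fallback (then A's substring pass) on miss
theorem pvBGo_eq (il : String) (va : List String) (fb : Option String) :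
    pvBGo il va fb =
      match pvAExact il va with
      | some a => some a
      | none => fb.or (pvASub il va) := by
  induction va generalizing fb with
  | nil => cases fb <;> rfl
  | cons a rest ih =>
    simp only [pvBGo, pvAExact, pvASub]
    by_cases hx : (PySem.Str.strip (PySem.Str.lower a) == il) = true
    · simp only [if_pos hx]
    · simp only [if_neg hx, ih]
      cases hA : pvAExact il rest with
      | some b => rfl
      | none =>
        cases fb with
        | some f => simp [Option.or]
        | none =>
          cases hC : (PySem.Str.isIn il (PySem.Str.lower a) ||
              PySem.Str.isIn (PySem.Str.lower a) il) <;>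
            simp only [Option.isNone, Bool.true_and, hC, if_true, if_false,
              Bool.false_eq_true, Option.or]

-- ===== VERDICT (by name: the statement is the Claim_ definition above) =====
theorem find_action_in_valid_spec : Claim_equal_find_action_in_valid := by
  intro ia va _
  show find_action_in_valid ia va = find_action_in_valid_alt ia va
  unfold find_action_in_valid find_action_in_valid_alt
  rw [pvBGo_eq]
  cases va with
  | nil => rfl
  | cons a rest =>
    simp only [if_neg (List.cons_ne_nil a rest)]
    cases pvAExact (PySem.Str.strip (PySem.Str.lower ia)) (a :: rest) <;> simp [Option.or]
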